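-- pv_equiv track=rewrite | github.com/byoeval/BYO-EVAL | evaluate_diagnose_dataset.py | modify_localization_questions
-- ===== SOURCE A (Python) =====
-- def modify_localization_questions(questions: list[str]) -> list[str]:
--     """Modify localization questions to request more precise location descriptions."""
--     modified_questions = []
--
--     for question in questions:
--         # For grid localization in poker with 3x3 grid
--         if "on which cell of the 3x3 grid" in question.lower():
--             if question.endswith("?"):
--                 modified_question = question[:-1] + "? Please answer with the position (e.g., upper left, middle, lower right)."
--             else:
--                 modified_question = question + " Please answer with the position (e.g., upper left, middle, lower right)."
--         # For other grid localization in poker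
--         elif any(keyword in question.lower() for keyword in ["on which cell of the grid", "on which row of the grid", "on which column of the grid"]):
--             if question.endswith("?"):
--                 modified_question = question[:-1] + "? Please answer with a single number only."
--             else:
--                 modified_question = question + " Please answer with a single number only."
--         # For questions asking about positions or coordinates
--         elif any(keyword in question.lower() for keyword in ["where", "position", "locate", "coordinate", "square"]):
--             if question.endswith("?"):
--                 modified_question = question[:-1] + "? Please be precise with locations or coordinates."
--             else:
--                 modified_question = question + " Please be precise with locations or coordinates."
--         # For counting questions that may appear in localization tasks
--         elif any(keyword in question.lower() for keyword in ["how many", "count", "number", "there are"]):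
--             if question.endswith("?"):
--                 modified_question = question[:-1] + "? Please respond with a single number only."
--             else:
--                 modified_question = question + " Please respond with a single number only."
--         # For yes/no questions
--         elif any(word in question.lower() for word in ["is there", "are there", "is the", "are the", "does", "do"]):
--             if question.endswith("?"):
--                 modified_question = question[:-1] + "? Please answer with 'Yes' or 'No' only."
--             else:
--                 modified_question = question + " Please answer with 'Yes' or 'No' only."
--         # For other localization questions
--         else:
--             if question.endswith("?"):
--                 modified_question = question[:-1] + "? Please be specific about the location in your answer."
--             else:
--                 modified_question = question + " Please be specific about the location in your answer."
--
--         modified_questions.append(modified_question)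
--
--     return modified_questions
-- ===== SOURCE B (Python) =====
-- _RULES = [
--     (["on which cell of the 3x3 grid"],
--      " Please answer with the position (e.g., upper left, middle, lower right)."),
--     (["on which cell of the grid", "on which row of the grid", "on which column of the grid"],
--      " Please answer with a single number only."),
--     (["where", "position", "locate", "coordinate", "square"],
--      " Please be precise with locations or coordinates."),
--     (["how many", "count", "number", "there are"],
--      " Please respond with a single number only."),
--     (["is there", "are there", "is the", "are the", "does", "do"],
--      " Please answer with 'Yes' or 'No' only."),
-- ]
-- _DEFAULT = " Please be specific about the location in your answer."
--
--
-- def _suffix(ql):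
--     for keywords, suffix in _RULES:
--         if any(k in ql for k in keywords):
--             return suffix
--     return _DEFAULT
--
--
-- def modify_localization_questions(questions):
--     return [q + _suffix(q.lower()) for q in questions]
-- ===== Notes on version B (the rewrite author's own statement) =====
-- stated objective: simpler
-- what changed: B replaces the six copy-pasted if/elif branches, each with a redundant endswith('?') split (question[:-1]+'? X' equals question+' X' whenever the question ends with '?'), by a single ordered (keywords, suffix) table scanned once per question plus one unconditional concatenation.
import Mathlib
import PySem

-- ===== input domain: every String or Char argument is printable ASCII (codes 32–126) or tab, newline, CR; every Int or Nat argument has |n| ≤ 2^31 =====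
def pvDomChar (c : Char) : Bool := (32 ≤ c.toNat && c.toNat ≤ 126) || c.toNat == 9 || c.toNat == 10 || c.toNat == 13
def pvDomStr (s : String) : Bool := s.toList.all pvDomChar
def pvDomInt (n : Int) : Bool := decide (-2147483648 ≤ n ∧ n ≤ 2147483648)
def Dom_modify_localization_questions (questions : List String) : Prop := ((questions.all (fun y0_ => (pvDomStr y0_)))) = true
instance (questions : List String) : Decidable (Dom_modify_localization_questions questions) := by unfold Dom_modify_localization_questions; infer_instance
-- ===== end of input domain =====

-- B replaces A's six copy-pasted if/elif branches, each with a redundant endswith('?') split,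
-- by one ordered (keywords, suffix) table and a single unconditional concatenation (objective: simpler).

-- ===== PORT A =====
-- loop body of A (the six-branch if/elif chain, each branch split on endswith("?"))
def pvModOne (question : String) : String :=
  if PySem.Str.isIn "on which cell of the 3x3 grid" (PySem.Str.lower question) then
    if PySem.Str.endswith question "?" then
      String.ofList ((PySem.Str.slice question none (some (-1))).toList ++ "? Please answer with the position (e.g., upper left, middle, lower right).".toList)
    else
      String.ofList (question.toList ++ " Please answer with the position (e.g., upper left, middle, lower right).".toList)
  else if ["on which cell of the grid", "on which row of the grid", "on which column of the grid"].any
      (fun keyword => PySem.Str.isIn keyword (PySem.Str.lower question)) then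
    if PySem.Str.endswith question "?" then
      String.ofList ((PySem.Str.slice question none (some (-1))).toList ++ "? Please answer with a single number only.".toList)
    else
      String.ofList (question.toList ++ " Please answer with a single number only.".toList)
  else if ["where", "position", "locate", "coordinate", "square"].any
      (fun keyword => PySem.Str.isIn keyword (PySem.Str.lower question)) then
    if PySem.Str.endswith question "?" then
      String.ofList ((PySem.Str.slice question none (some (-1))).toList ++ "? Please be precise with locations or coordinates.".toList)
    else
      String.ofList (question.toList ++ " Please be precise with locations or coordinates.".toList)
  else if ["how many", "count", "number", "there are"].any
      (fun keyword => PySem.Str.isIn keyword (PySem.Str.lower question)) then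
    if PySem.Str.endswith question "?" then
      String.ofList ((PySem.Str.slice question none (some (-1))).toList ++ "? Please respond with a single number only.".toList)
    else
      String.ofList (question.toList ++ " Please respond with a single number only.".toList)
  else if ["is there", "are there", "is the", "are the", "does", "do"].any
      (fun word => PySem.Str.isIn word (PySem.Str.lower question)) then
    if PySem.Str.endswith question "?" then
      String.ofList ((PySem.Str.slice question none (some (-1))).toList ++ "? Please answer with 'Yes' or 'No' only.".toList)
    else
      String.ofList (question.toList ++ " Please answer with 'Yes' or 'No' only.".toList)
  else
    if PySem.Str.endswith question "?" then
      String.ofList ((PySem.Str.slice question none (some (-1))).toList ++ "? Please be specific about the location in your answer.".toList)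
    else
      String.ofList (question.toList ++ " Please be specific about the location in your answer.".toList)

def modify_localization_questions (questions : List String) : List String :=
  questions.foldl (fun modified_questions question => modified_questions ++ [pvModOne question]) []

-- ===== PORT B =====
def pvRules : List (List String × String) :=
  [ (["on which cell of the 3x3 grid"],
     " Please answer with the position (e.g., upper left, middle, lower right)."),
    (["on which cell of the grid", "on which row of the grid", "on which column of the grid"],
     " Please answer with a single number only."),
    (["where", "position", "locate", "coordinate", "square"],
     " Please be precise with locations or coordinates."),
    (["how many", "count", "number", "there are"],
     " Please respond with a single number only."),
    (["is there", "are there", "is the", "are the", "does", "do"],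
     " Please answer with 'Yes' or 'No' only.") ]

def pvDefault : String := " Please be specific about the location in your answer."

def pvSuffix (ql : String) : List (List String × String) → String
  | [] => pvDefault
  | (keywords, suffix) :: rest =>
      if keywords.any (fun k => PySem.Str.isIn k ql) then suffix else pvSuffix ql rest

def modify_localization_questions_alt (questions : List String) : List String :=
  questions.map (fun q => String.ofList (q.toList ++ (pvSuffix (PySem.Str.lower q) pvRules).toList))

-- ===== PRECONDITION & SPEC =====
def Spec_modify_localization_questions (questions : List String) (out : List String) : Prop := out = modify_localization_questions_alt questions
instance (questions : List String) (out : List String) : Decidable (Spec_modify_localization_questions questions out) := by unfold Spec_modify_localization_questions; infer_instance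

-- ===== CLAIM (what is proved, stated in full; the proofs are below) =====
def Claim_equal_modify_localization_questions : Prop := ∀ (questions : List String), Dom_modify_localization_questions questions → Spec_modify_localization_questions questions (modify_localization_questions questions)

-- ===== LEMMAS AND PROOFS =====

-- If question ends with "?", dropping the "?" and re-appending "?" ++ rest is appending rest.
lemma pv_endswith_concat (q : String) (rest : List Char)
    (h : PySem.Str.endswith q "?" = true) :
    (PySem.Str.slice q none (some (-1))).toList ++ ('?' :: rest) = q.toList ++ rest := by
  rw [PySem.Str.slice_to_neg_one]
  have hs : "?".toList <:+ q.toList := by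
    simpa [PySem.Chars.endswith_iff] using h
  obtain ⟨t, ht⟩ := hs
  rw [← ht]
  simp

-- a then-branch of A (question ends with "?") equals B's unconditional append
lemma pv_then (q a b : String) (h : PySem.Str.endswith q "?" = true)
    (hab : a.toList = '?' :: b.toList) :
    String.ofList ((PySem.Str.slice q none (some (-1))).toList ++ a.toList)
      = String.ofList (q.toList ++ b.toList) := by
  rw [hab, pv_endswith_concat q _ h]

set_option maxHeartbeats 1000000 in
lemma pv_one_eq (q : String) :
    pvModOne q = String.ofList (q.toList ++ (pvSuffix (PySem.Str.lower q) pvRules).toList) := by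
  simp only [pvModOne, pvRules, pvDefault, pvSuffix, List.any_cons, List.any_nil, Bool.or_false]
  split_ifs
  · exact pv_then q _ _ ‹_› (by decide)
  · rfl
  · exact pv_then q _ _ ‹_› (by decide)
  · rfl
  · exact pv_then q _ _ ‹_› (by decide)
  · rfl
  · exact pv_then q _ _ ‹_› (by decide)
  · rfl
  · exact pv_then q _ _ ‹_› (by decide)
  · rfl
  · exact pv_then q _ _ ‹_› (by decide)
  · rfl


-- ===== VERDICT (by name: the statement is the Claim_ definition above) =====
theorem modify_localization_questions_spec : Claim_equal_modify_localization_questions := by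
  intro questions _
  unfold Spec_modify_localization_questions
  rw [modify_localization_questions, PySem.List.foldl_append_singleton_eq_map,
    modify_localization_questions_alt]
  exact List.map_congr_left (fun q _ => pv_one_eq q)
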